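-- pv_equiv track=rewrite | github.com/JackTheEgg/Advent-of-Code | 2017/Python/11.py | hexagons
-- ===== SOURCE A (Python) =====
-- def hexagons(steps):
-- 	if steps == 0:
-- 		return [(0,0)]
-- 	else:
-- 		points = []
-- 		x, y = 0, 2*steps
-- 		for mov in movs:
-- 			for n in range(steps):
-- 				x += mov[0]
-- 				y += mov[1]
-- 				points.append((x, y))
-- 		return points
--
-- movs = [(1,-1), (0,-2), (-1,-1), (-1,1), (0,2), (1,1)]
-- ===== SOURCE B (Python) =====
-- movs = [(1,-1), (0,-2), (-1,-1), (-1,1), (0,2), (1,1)]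
--
-- def _corners(c, ms, steps):
--     # side-start corners of the ring: c, then c shifted by steps*mov for each mov
--     if not ms:
--         return [c]
--     dx, dy = ms[0]
--     return [c] + _corners((c[0] + steps * dx, c[1] + steps * dy), ms[1:], steps)
--
-- def hexagons(steps):
--     if steps == 0:
--         return [(0, 0)]
--     corners = _corners((0, 2 * steps), movs, steps)
--     return [(cx + (n + 1) * dx, cy + (n + 1) * dy)
--             for (cx, cy), (dx, dy) in zip(corners, movs)
--             for n in range(steps)]
-- ===== Notes on version B (the rewrite author's own statement) =====
-- stated objective: alternative
-- what changed: B precomputes the six side-corner positions of the ring and emits each point directly as corner + (n+1)*mov, replacing A's running (x,y) accumulator mutated across both nested loops.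
import Mathlib
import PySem

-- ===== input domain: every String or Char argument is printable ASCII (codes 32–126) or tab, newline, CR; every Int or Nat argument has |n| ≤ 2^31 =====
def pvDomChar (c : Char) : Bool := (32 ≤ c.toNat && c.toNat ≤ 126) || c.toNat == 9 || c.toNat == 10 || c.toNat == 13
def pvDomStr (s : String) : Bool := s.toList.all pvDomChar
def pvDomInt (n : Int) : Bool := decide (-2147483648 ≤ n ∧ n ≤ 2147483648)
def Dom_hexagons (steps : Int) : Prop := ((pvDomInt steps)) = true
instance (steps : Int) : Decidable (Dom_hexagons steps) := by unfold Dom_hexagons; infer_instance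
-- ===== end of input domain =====

-- B replaces A's running (x,y) accumulator by the six precomputed side corners and emits
-- each ring point directly as corner + (n+1)*mov (objective: alternative decomposition).

def movs : List (Int × Int) := [(1,-1), (0,-2), (-1,-1), (-1,1), (0,2), (1,1)]

-- ===== PORT A =====
def hexagons (steps : Int) : List (Int × Int) :=
  if steps = 0 then [(0, 0)]
  else
    (movs.foldl
      (fun st mov =>
        (PySem.List.pyRange 0 steps 1).foldl
          (fun st _n =>
            ((st.1.1 + mov.1, st.1.2 + mov.2),
             st.2 ++ [(st.1.1 + mov.1, st.1.2 + mov.2)]))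
          st)
      ((0, 2 * steps), [])).2

-- ===== PORT B =====
def hexCorners (c : Int × Int) (ms : List (Int × Int)) (steps : Int) : List (Int × Int) :=
  match ms with
  | [] => [c]
  | d :: rest => c :: hexCorners (c.1 + steps * d.1, c.2 + steps * d.2) rest steps

def hexagons_alt (steps : Int) : List (Int × Int) :=
  if steps = 0 then [(0, 0)]
  else
    ((hexCorners (0, 2 * steps) movs steps).zip movs).flatMap
      (fun p =>
        (PySem.List.pyRange 0 steps 1).map
          (fun n => (p.1.1 + (n + 1) * p.2.1, p.1.2 + (n + 1) * p.2.2)))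

-- ===== PRECONDITION & SPEC =====
def Spec_hexagons (steps : Int) (out : List (Int × Int)) : Prop := out = hexagons_alt steps
instance (steps : Int) (out : List (Int × Int)) : Decidable (Spec_hexagons steps out) := by unfold Spec_hexagons; infer_instance

-- ===== CLAIM (what is proved, stated in full; the proofs are below) =====
def Claim_equal_hexagons : Prop := ∀ (steps : Int), Dom_hexagons steps → Spec_hexagons steps (hexagons steps)

-- ===== LEMMAS AND PROOFS =====

-- A's inner loop over range(steps) from position (x,y): final position and emitted points.
lemma innerLoop (k : Nat) (dx dy x y : Int) (acc : List (Int × Int)) :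
    (PySem.List.pyRange 0 (k : Int) 1).foldl
      (fun st (_n : Int) =>
        ((st.1.1 + dx, st.1.2 + dy), st.2 ++ [(st.1.1 + dx, st.1.2 + dy)]))
      ((x, y), acc)
    = ((x + k * dx, y + k * dy),
       acc ++ (PySem.List.pyRange 0 (k : Int) 1).map
         (fun n => (x + (n + 1) * dx, y + (n + 1) * dy))) := by
  induction k with
  | zero => simp [PySem.List.pyRange_one_eq_nil]
  | succ k ih =>
      have hk : ((k + 1 : Nat) : Int) = (k : Int) + 1 := by push_cast; ring
      rw [hk, PySem.List.pyRange_one_succ_right (by exact_mod_cast Nat.zero_le k)]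
      simp only [List.foldl_append, List.map_append, ih, List.foldl_cons, List.foldl_nil,
        List.map_cons, List.map_nil]
      have h1 : x + (k : Int) * dx + dx = x + ((k : Int) + 1) * dx := by ring
      have h2 : y + (k : Int) * dy + dy = y + ((k : Int) + 1) * dy := by ring
      rw [h1, h2, List.append_assoc]

-- A's outer loop over the move list equals B's corner-wise flatMap, for any move list.
lemma outerLoop (k : Nat) (ms : List (Int × Int)) :
    ∀ (c : Int × Int) (acc : List (Int × Int)),
    (ms.foldl
      (fun st mov =>
        (PySem.List.pyRange 0 (k : Int) 1).foldl
          (fun st (_n : Int) =>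
            ((st.1.1 + mov.1, st.1.2 + mov.2),
             st.2 ++ [(st.1.1 + mov.1, st.1.2 + mov.2)]))
          st)
      (c, acc)).2
    = acc ++ ((hexCorners c ms (k : Int)).zip ms).flatMap
        (fun p =>
          (PySem.List.pyRange 0 (k : Int) 1).map
            (fun n => (p.1.1 + (n + 1) * p.2.1, p.1.2 + (n + 1) * p.2.2))) := by
  induction ms with
  | nil => intro c acc; simp [hexCorners]
  | cons m rest ih =>
      intro c acc
      simp only [List.foldl_cons, hexCorners, List.zip_cons_cons, List.flatMap_cons]
      rw [innerLoop k m.1 m.2 c.1 c.2 acc, ih]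
      simp [List.append_assoc]

lemma hexagons_eq_alt (steps : Int) : hexagons steps = hexagons_alt steps := by
  unfold hexagons hexagons_alt
  by_cases h0 : steps = 0
  · simp [h0]
  · simp only [h0, if_false]
    rcases lt_trichotomy steps 0 with hneg | hz | hpos
    · -- steps < 0: both sides are empty
      rw [PySem.List.pyRange_one_eq_nil hneg.le]
      simp [movs, hexCorners]
    · exact absurd hz h0
    · have hk : steps = ((steps.toNat : Nat) : Int) := (Int.toNat_of_nonneg hpos.le).symm
      rw [hk]
      exact outerLoop steps.toNat movs (0, 2 * ((steps.toNat : Nat) : Int)) []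

-- ===== VERDICT (by name: the statement is the Claim_ definition above) =====
theorem hexagons_spec : Claim_equal_hexagons := by
  intro steps _
  exact hexagons_eq_alt steps
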